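-- pv_equiv track=rewrite | github.com/herojulie/leetcode | HankeRank/gaming-array-1.py | gamingArray
-- ===== SOURCE A (Python) =====
-- def gamingArray(arr):
--     # Write your code here
--     max_count = 0
--     max_value = arr[0]
--     for e in arr[1:]:
--         if e > max_value:
--             max_value = e
--             max_count += 1
--
--     return 'BOB' if max_count % 2 == 0 else 'ANDY'
-- ===== SOURCE B (Python) =====
-- def gamingArray(arr):
--     # Divide and conquer: rec(v, lo, hi) returns (number of new running-max
--     # records in arr[lo:hi] given current max v, resulting max).
--     def rec(v, lo, hi):
--         if hi - lo == 1:
--             e = arr[lo]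
--             return (1, e) if e > v else (0, v)
--         mid = (lo + hi) // 2
--         c1, v1 = rec(v, lo, mid)
--         c2, v2 = rec(v1, mid, hi)
--         return (c1 + c2, v2)
--     n = len(arr)
--     init = arr[0]
--     count = rec(init, 1, n)[0] if n > 1 else 0
--     return 'BOB' if count % 2 == 0 else 'ANDY'
-- ===== Notes on version B (the rewrite author's own statement) =====
-- stated objective: alternative
-- what changed: A's linear running-max scan is replaced by a divide-and-conquer recursion on index ranges that splits at the midpoint and threads the current maximum through the two halves, summing the record counts.
import Mathlib
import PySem

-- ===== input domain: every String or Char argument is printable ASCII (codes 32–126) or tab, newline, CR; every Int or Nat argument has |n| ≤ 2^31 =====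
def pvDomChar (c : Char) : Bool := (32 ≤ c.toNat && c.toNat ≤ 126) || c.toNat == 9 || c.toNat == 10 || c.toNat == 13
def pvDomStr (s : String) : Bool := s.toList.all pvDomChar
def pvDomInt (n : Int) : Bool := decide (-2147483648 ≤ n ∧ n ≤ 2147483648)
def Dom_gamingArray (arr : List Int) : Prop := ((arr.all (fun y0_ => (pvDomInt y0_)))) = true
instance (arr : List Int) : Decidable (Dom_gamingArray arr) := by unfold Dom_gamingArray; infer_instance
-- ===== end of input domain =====

-- B changes the decomposition only: a midpoint divide-and-conquer recursion replaces A's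
-- left-to-right running-max scan (same O(n) cost, no speed claim).

-- ===== PORT A =====
-- A: single pass over arr[1:] carrying (max_count, max_value), seeded with arr[0].
def gamingArray (arr : List Int) : String :=
  let s := (PySem.List.slice arr (some 1) none).foldl
      (fun (p : Int × Int) e => if e > p.2 then (p.1 + 1, e) else p)
      (0, PySem.List.pyGetD arr 0 0)
  if PySem.Int.mod s.1 2 = 0 then "BOB" else "ANDY"

-- ===== PORT B =====
-- rec(v, lo, hi) of Source B; the empty-range branch is a totality guard only
-- (Python never calls rec on an empty range).
def pvRec (arr : List Int) (v : Int) (lo hi : Int) : Int × Int :=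
  if hi - lo = 1 then
    let e := PySem.List.pyGetD arr lo 0
    if e > v then (1, e) else (0, v)
  else if hi - lo ≤ 0 then (0, v)
  else
    let mid := PySem.Int.floordiv (lo + hi) 2
    let r1 := pvRec arr v lo mid
    let r2 := pvRec arr r1.2 mid hi
    (r1.1 + r2.1, r2.2)
termination_by (hi - lo).toNat
decreasing_by
  · have h := PySem.Int.floordiv_eq_iff_of_pos (a := lo + hi) (b := 2)
      (q := PySem.Int.floordiv (lo + hi) 2) (by omega)
    have := h.mp rfl; omega
  · have h := PySem.Int.floordiv_eq_iff_of_pos (a := lo + hi) (b := 2)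
      (q := PySem.Int.floordiv (lo + hi) 2) (by omega)
    have := h.mp rfl; omega

def gamingArray_alt (arr : List Int) : String :=
  let n := PySem.List.len arr
  let init := PySem.List.pyGetD arr 0 0
  let count := if n > 1 then (pvRec arr init 1 n).1 else 0
  if PySem.Int.mod count 2 = 0 then "BOB" else "ANDY"

-- ===== PRECONDITION & SPEC =====
-- Pre_ excludes only the empty list, on which both A and B raise IndexError at arr[0].
def Pre_gamingArray (arr : List Int) : Prop := arr ≠ []
instance (arr : List Int) : Decidable (Pre_gamingArray arr) := by unfold Pre_gamingArray; infer_instance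
def pvWitness_gamingArray : List Int := ([1, 2])

def Spec_gamingArray (arr : List Int) (out : String) : Prop := out = gamingArray_alt arr
instance (arr : List Int) (out : String) : Decidable (Spec_gamingArray arr out) := by unfold Spec_gamingArray; infer_instance

-- ===== CLAIM (what is proved, stated in full; the proofs are below) =====
def Claim_equal_gamingArray : Prop := ∀ (arr : List Int), Dom_gamingArray arr → Pre_gamingArray arr → Spec_gamingArray arr (gamingArray arr)

-- ===== LEMMAS AND PROOFS =====

-- the number of new strict running-max records of l seen from current max v
def pvCm (v : Int) : List Int → Int
  | [] => 0
  | e :: t => if e > v then pvCm e t + 1 else pvCm v t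

theorem pvCm_append (s1 s2 : List Int) : ∀ v : Int,
    pvCm v (s1 ++ s2) = pvCm v s1 + pvCm (s1.foldl max v) s2 := by
  induction s1 with
  | nil => intro v; simp [pvCm]
  | cons e t ih =>
    intro v
    by_cases h : e > v
    · simp [pvCm, h, ih, max_eq_right (le_of_lt h)]; ring
    · simp [pvCm, h, ih, max_eq_left (le_of_not_gt h)]

theorem pvA_fold (l : List Int) : ∀ (c v : Int),
    l.foldl (fun (p : Int × Int) e => if e > p.2 then (p.1 + 1, e) else p) (c, v)
      = (c + pvCm v l, l.foldl max v) := by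
  induction l with
  | nil => intro c v; simp [pvCm]
  | cons e t ih =>
    intro c v
    by_cases h : e > v
    · simp [pvCm, h, ih, max_eq_right (le_of_lt h)]; ring
    · simp [pvCm, h, ih, max_eq_left (le_of_not_gt h)]

theorem pvRec_spec (arr : List Int) : ∀ (k : Nat) (v lo hi : Int),
    (hi - lo).toNat = k → 0 ≤ lo → lo < hi → hi ≤ arr.length →
    pvRec arr v lo hi
      = (pvCm v ((arr.drop lo.toNat).take (hi - lo).toNat),
         ((arr.drop lo.toNat).take (hi - lo).toNat).foldl max v) := by
  intro k
  induction k using Nat.strong_induction_on with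
  | _ k ih =>
    intro v lo hi hk h0 hlt hle
    have hlolen : lo.toNat < arr.length := by omega
    by_cases h1 : hi - lo = 1
    · -- single element segment
      have hseg : (arr.drop lo.toNat).take (hi - lo).toNat = [arr[lo.toNat]] := by
        have h' : (hi - lo).toNat = 1 := by omega
        rw [h', List.drop_eq_getElem_cons hlolen]
        rfl
      rw [pvRec, if_pos h1, hseg]
      rw [PySem.List.pyGetD_eq_getElem arr 0 h0 (by omega)]
      by_cases h : arr[lo.toNat] > v
      · simp [pvCm, h, max_eq_right (le_of_lt h)]
      · simp [pvCm, h, max_eq_left (le_of_not_gt h)]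
    · -- split at the midpoint
      have h2 : 2 ≤ hi - lo := by omega
      have hmid := (PySem.Int.floordiv_eq_iff_of_pos (a := lo + hi) (b := 2)
        (q := PySem.Int.floordiv (lo + hi) 2) (by omega)).mp rfl
      set mid := PySem.Int.floordiv (lo + hi) 2 with hm
      have hlm : lo < mid := by omega
      have hmh : mid < hi := by omega
      have e1 := ih (mid - lo).toNat (by omega) v lo mid rfl h0 hlm (by omega)
      have e2 := ih (hi - mid).toNat (by omega)
        (((arr.drop lo.toNat).take (mid - lo).toNat).foldl max v) mid hi rfl (by omega) hmh hle
      rw [pvRec, if_neg h1, if_neg (by omega : ¬ hi - lo ≤ 0)]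
      show ((pvRec arr v lo mid).1 + (pvRec arr (pvRec arr v lo mid).2 mid hi).1,
            (pvRec arr (pvRec arr v lo mid).2 mid hi).2)
          = (pvCm v ((arr.drop lo.toNat).take (hi - lo).toNat),
             ((arr.drop lo.toNat).take (hi - lo).toNat).foldl max v)
      rw [e1]
      dsimp only
      rw [e2]
      have hsplit : (arr.drop lo.toNat).take (hi - lo).toNat
          = (arr.drop lo.toNat).take (mid - lo).toNat
            ++ (arr.drop mid.toNat).take (hi - mid).toNat := by
        have h3 : (hi - lo).toNat = (mid - lo).toNat + (hi - mid).toNat := by omega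
        have h4 : arr.drop mid.toNat = (arr.drop lo.toNat).drop (mid - lo).toNat := by
          rw [List.drop_drop]; congr 1; omega
        rw [h3, List.take_add, h4]
      rw [hsplit, pvCm_append, List.foldl_append]

theorem gamingArray_spec : Claim_equal_gamingArray := by
  intro arr _ hpre
  unfold Spec_gamingArray gamingArray gamingArray_alt
  obtain ⟨x, xs, rfl⟩ : ∃ y ys, arr = y :: ys := by
    cases arr with
    | nil => exact absurd rfl hpre
    | cons a l => exact ⟨a, l, rfl⟩
  simp only [PySem.List.slice_from_one, List.tail_cons, PySem.List.len_eq,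
    PySem.List.pyGetD_zero_cons, pvA_fold]
  by_cases hn : ((x :: xs).length : Int) > 1
  · rw [if_pos hn]
    rw [pvRec_spec (x :: xs) (((x :: xs).length : Int) - 1).toNat x 1 ((x :: xs).length : Int)
      rfl (by omega) (by omega) (by omega)]
    have hseg : (((x :: xs).drop (1 : Int).toNat).take (((x :: xs).length : Int) - 1).toNat) = xs := by
      simp
    rw [hseg]
    simp
  · rw [if_neg hn]
    have : xs = [] := by
      cases xs with
      | nil => rfl
      | cons b t => exfalso; simp at hn
    subst this
    simp [pvCm]
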